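-- pv_equiv track=rewrite | github.com/abdulsaabir/Python-2 | string/String Problems/10.modify_first_char_occurrences.py | modify_first_char_occurrences
-- ===== SOURCE A (Python) =====
-- def modify_first_char_occurrences(input_text, symbol):
--     if len(input_text) < 2:
--         return input_text  # Cannot modify if the text has only one character or is empty
--
--     first_char = input_text[0]
--     modified_text = first_char
--
--     for char in input_text[1:]:
--         if char.lower() == first_char.lower():
--             modified_text += symbol
--         else:
--             modified_text += char
--
--     return modified_text
-- ===== SOURCE B (Python) =====
-- def modify_first_char_occurrences(input_text, symbol):
--     if len(input_text) < 2:
--         return input_text  # nothing to modify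
--     first = input_text[0]
--     tail = input_text[1:]
--     pieces = []
--     rest = tail
--     for part in tail.lower().split(first.lower()):
--         pieces.append(rest[:len(part)])
--         rest = rest[len(part) + 1:]
--     return first + symbol.join(pieces)
-- ===== Notes on version B (the rewrite author's own statement) =====
-- stated objective: alternative
-- what changed: Replaces A's per-character scan-and-append loop by a split/join scheme: split the lowered tail on the lowered first character, re-slice the original tail by the piece lengths, and join the pieces with the symbol.
import Mathlib
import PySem

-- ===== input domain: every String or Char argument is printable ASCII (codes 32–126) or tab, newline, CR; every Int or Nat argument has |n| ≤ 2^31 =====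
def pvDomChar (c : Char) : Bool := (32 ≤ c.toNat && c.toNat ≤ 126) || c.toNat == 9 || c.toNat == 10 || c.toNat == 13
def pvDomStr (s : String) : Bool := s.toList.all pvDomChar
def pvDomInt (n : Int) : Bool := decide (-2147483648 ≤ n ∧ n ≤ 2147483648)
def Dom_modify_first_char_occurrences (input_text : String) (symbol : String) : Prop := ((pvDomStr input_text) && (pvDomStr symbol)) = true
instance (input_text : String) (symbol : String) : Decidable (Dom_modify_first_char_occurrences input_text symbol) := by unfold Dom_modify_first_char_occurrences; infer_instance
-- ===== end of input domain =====

-- B replaces A's per-character scan-and-append loop by a split/join scheme: split the lowered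
-- tail on the lowered first character, re-slice the original tail by the piece lengths, and
-- join the pieces with the symbol (objective: alternative algorithm, same cost).

-- ===== PORT A =====
def modify_first_char_occurrences (input_text : String) (symbol : String) : String :=
  if PySem.Str.len input_text < 2 then input_text
  else
    let first := (PySem.List.pyGet? input_text.toList 0).getD ' '
    let modified := (PySem.List.slice input_text.toList (some 1) none).foldl
      (fun acc c => if PySem.Chars.lowerChar c = PySem.Chars.lowerChar first
                    then acc ++ symbol.toList else acc ++ [c]) [first]
    String.ofList modified

-- ===== PORT B =====
def modify_first_char_occurrences_alt (input_text : String) (symbol : String) : String :=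
  if PySem.Str.len input_text < 2 then input_text
  else
    let first := (PySem.List.pyGet? input_text.toList 0).getD ' '
    let tail := PySem.List.slice input_text.toList (some 1) none
    let parts := PySem.Chars.splitOn (PySem.Chars.lower tail) (PySem.Chars.lower [first])
    let st := parts.foldl
      (fun (st : List (List Char) × List Char) part =>
        (st.1 ++ [PySem.List.slice st.2 none (some (part.length : Int))],
         PySem.List.slice st.2 (some ((part.length : Int) + 1)) none))
      ([], tail)
    String.ofList (first :: PySem.Chars.join symbol.toList st.1)

-- ===== PRECONDITION & SPEC =====
def Spec_modify_first_char_occurrences (input_text : String) (symbol : String) (out : String) : Prop := out = modify_first_char_occurrences_alt input_text symbol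
instance (input_text : String) (symbol : String) (out : String) : Decidable (Spec_modify_first_char_occurrences input_text symbol out) := by unfold Spec_modify_first_char_occurrences; infer_instance

-- ===== CLAIM (what is proved, stated in full; the proofs are below) =====
def Claim_equal_modify_first_char_occurrences : Prop := ∀ (input_text : String) (symbol : String), Dom_modify_first_char_occurrences input_text symbol → Spec_modify_first_char_occurrences input_text symbol (modify_first_char_occurrences input_text symbol)

-- ===== LEMMAS AND PROOFS =====

-- Structural model of splitting on a single-character separator g.
def pvSplitAux (g : Char) : List Char → List (List Char)
  | [] => [[]]
  | c :: rest =>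
    if c = g then [] :: pvSplitAux g rest
    else match pvSplitAux g rest with
         | [] => [[c]]          -- unreachable: pvSplitAux is never []
         | p :: ps => (c :: p) :: ps

def pvHeadCons (x : List Char) : List (List Char) → List (List Char)
  | [] => [x]
  | p :: ps => (x ++ p) :: ps

theorem pvSplitAux_ne_nil (g : Char) (l : List Char) : pvSplitAux g l ≠ [] := by
  cases l with
  | nil => simp [pvSplitAux]
  | cons c rest =>
    simp only [pvSplitAux]
    split
    · simp
    · split <;> simp_all

theorem pvGo_eq (g : Char) (fuel : Nat) (l cur : List Char) (acc : List (List Char))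
    (h : l.length ≤ fuel) :
    PySem.Chars.splitOn.go [g] fuel l cur acc
      = acc.reverse ++ pvHeadCons cur.reverse (pvSplitAux g l) := by
  induction fuel generalizing l cur acc with
  | zero =>
    have hl : l = [] := by cases l <;> simp_all
    subst hl
    rw [PySem.Chars.splitOn.go.eq_def]
    simp [pvSplitAux, pvHeadCons]
  | succ fuel ih =>
    cases l with
    | nil =>
      rw [PySem.Chars.splitOn.go.eq_def]
      simp [pvSplitAux, pvHeadCons]
    | cons c rest =>
      have hrest : rest.length ≤ fuel := by simp at h; omega
      rw [PySem.Chars.splitOn.go.eq_def]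
      dsimp only
      have hpre : List.isPrefixOf [g] (c :: rest) = (g == c) := by
        simp [List.isPrefixOf]
      cases hS : pvSplitAux g rest with
      | nil => exact absurd hS (pvSplitAux_ne_nil g rest)
      | cons p ps =>
        by_cases hgc : g = c
        · have hp : List.isPrefixOf [g] (c :: rest) = true := by simp [hgc]
          rw [if_pos hp]
          have hd : List.drop ([g] : List Char).length (c :: rest) = rest := by simp
          rw [hd, ih rest [] (cur.reverse :: acc) hrest]
          have hs2 : pvSplitAux g (c :: rest) = [] :: p :: ps := by
            simp [pvSplitAux, hgc.symm, hS]
          rw [hs2, hS]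
          simp [pvHeadCons]
        · have hcg : ¬ c = g := by intro h'; exact hgc h'.symm
          have hp : ¬ List.isPrefixOf [g] (c :: rest) = true := by
            simp [hpre]
            intro h'
            exact hgc h'
          rw [if_neg hp, ih rest (c :: cur) acc hrest]
          have hs2 : pvSplitAux g (c :: rest) = (c :: p) :: ps := by
            simp only [pvSplitAux, hS]
            rw [if_neg hcg]
          rw [hs2, hS]
          simp [pvHeadCons]

theorem pvSplitOn_single (g : Char) (l : List Char) :
    PySem.Chars.splitOn l [g] = pvSplitAux g l := by
  unfold PySem.Chars.splitOn
  rw [pvGo_eq g (l.length + 1) l [] [] (by omega)]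
  cases hS : pvSplitAux g l with
  | nil => exact absurd hS (pvSplitAux_ne_nil g l)
  | cons p ps => simp [pvHeadCons]

-- The re-slicing pass of B, as a structural recursion.
def pvRecon : List Char → List (List Char) → List (List Char)
  | _, [] => []
  | t, p :: ps => t.take p.length :: pvRecon (t.drop (p.length + 1)) ps

theorem pvRecon_ne_nil (t : List Char) (p : List Char) (ps : List (List Char)) :
    pvRecon t (p :: ps) ≠ [] := by simp [pvRecon]

theorem pvFold_eq (parts : List (List Char)) (acc : List (List Char)) (t : List Char) :
    (parts.foldl
      (fun (st : List (List Char) × List Char) part =>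
        (st.1 ++ [PySem.List.slice st.2 none (some (part.length : Int))],
         PySem.List.slice st.2 (some ((part.length : Int) + 1)) none))
      (acc, t)).1 = acc ++ pvRecon t parts := by
  induction parts generalizing acc t with
  | nil => simp [pvRecon]
  | cons p ps ih =>
    simp only [List.foldl_cons]
    have h1 : PySem.List.slice t none (some (p.length : Int)) = t.take p.length :=
      PySem.List.slice_to_natCast t p.length
    have h2 : PySem.List.slice t (some ((p.length : Int) + 1)) none = t.drop (p.length + 1) := by
      have : ((p.length : Int) + 1) = ((p.length + 1 : Nat) : Int) := by push_cast; ring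
      rw [this]; exact PySem.List.slice_from_natCast t (p.length + 1)
    rw [h1, h2, ih]
    simp [pvRecon]

theorem pvJoin_cons_head (sym : List Char) (c : Char) (x : List Char) (xs : List (List Char)) :
    PySem.Chars.join sym ((c :: x) :: xs) = c :: PySem.Chars.join sym (x :: xs) := by
  cases xs with
  | nil => simp [PySem.Chars.join_singleton]
  | cons b l => rw [PySem.Chars.join_cons_cons, PySem.Chars.join_cons_cons]; simp

theorem pvMain (g : Char) (sym : List Char) (t : List Char) :
    PySem.Chars.join sym (pvRecon t (pvSplitAux g (t.map PySem.Chars.lowerChar)))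
      = t.flatMap (fun c => if PySem.Chars.lowerChar c = g then sym else [c]) := by
  induction t with
  | nil => simp [pvSplitAux, pvRecon, PySem.Chars.join_singleton]
  | cons c t ih =>
    simp only [List.map_cons, List.flatMap_cons]
    cases hS : pvSplitAux g (t.map PySem.Chars.lowerChar) with
    | nil => exact absurd hS (pvSplitAux_ne_nil g _)
    | cons p ps =>
      rw [hS] at ih
      by_cases hcg : PySem.Chars.lowerChar c = g
      · have hs : pvSplitAux g (PySem.Chars.lowerChar c :: t.map PySem.Chars.lowerChar)
            = [] :: p :: ps := by simp [pvSplitAux, hcg, hS]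
        rw [hs, if_pos hcg]
        have hr : pvRecon (c :: t) ([] :: p :: ps) = [] :: pvRecon t (p :: ps) := by
          simp [pvRecon]
        rw [hr]
        cases hX : pvRecon t (p :: ps) with
        | nil => exact absurd hX (pvRecon_ne_nil t p ps)
        | cons x xs =>
          rw [PySem.Chars.join_cons_cons, ← hX, ih]
          simp
      · have hs : pvSplitAux g (PySem.Chars.lowerChar c :: t.map PySem.Chars.lowerChar)
            = (PySem.Chars.lowerChar c :: p) :: ps := by
          simp only [pvSplitAux, hS]
          rw [if_neg hcg]
        rw [hs, if_neg hcg]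
        have hr : pvRecon (c :: t) ((PySem.Chars.lowerChar c :: p) :: ps)
            = (c :: t.take p.length) :: pvRecon (t.drop (p.length + 1)) ps := by
          simp [pvRecon]
        rw [hr, pvJoin_cons_head]
        have h2 : PySem.Chars.join sym (t.take p.length :: pvRecon (t.drop (p.length + 1)) ps)
            = t.flatMap (fun c => if PySem.Chars.lowerChar c = g then sym else [c]) := by
          simpa [pvRecon] using ih
        rw [h2]
        rfl

-- ===== VERDICT (by name: the statement is the Claim_ definition above) =====
theorem modify_first_char_occurrences_spec : Claim_equal_modify_first_char_occurrences := by
  intro t s _hDom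
  unfold Spec_modify_first_char_occurrences modify_first_char_occurrences modify_first_char_occurrences_alt
  by_cases h2 : PySem.Str.len t < 2
  · rw [if_pos h2, if_pos h2]
  · rw [if_neg h2, if_neg h2]
    refine congrArg String.ofList ?_
    set first := (PySem.List.pyGet? t.toList 0).getD ' ' with hf
    set tail := PySem.List.slice t.toList (some 1) none with ht
    -- A's side: foldl-append is a flatMap prefixed by [first]
    have hfun : (fun (acc : List Char) c => if PySem.Chars.lowerChar c = PySem.Chars.lowerChar first
                    then acc ++ s.toList else acc ++ [c])
        = (fun acc c => acc ++ (if PySem.Chars.lowerChar c = PySem.Chars.lowerChar first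
                    then s.toList else [c])) := by
      funext acc c; split <;> rfl
    rw [hfun, PySem.List.foldl_append_eq_flatMap]
    simp only [List.singleton_append, List.cons.injEq, true_and]
    -- B's side
    have hlow : PySem.Chars.lower [first] = [PySem.Chars.lowerChar first] := by
      simp [PySem.Chars.lower]
    rw [hlow, PySem.Chars.lower, pvSplitOn_single, pvFold_eq]
    simpa using (pvMain (PySem.Chars.lowerChar first) s.toList tail).symm
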